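-- pv_equiv track=rewrite | github.com/MarwinaSamson/2025-CP_Section_Placement_and_Student_Risk_Prediction | teacher/utils/attendance_utils.py | parse_daily_attendance
-- ===== SOURCE A (Python) =====
-- def parse_daily_attendance(attendance_dict):
--     """
--     Parse daily attendance dictionary and calculate statistics.
--
--     Args:
--         attendance_dict (dict): Dictionary with day numbers as keys, codes as values
--
--     Returns:
--         dict: Statistics with present, absent, tardy counts
--     """
--     stats = {
--         'present': 0,
--         'absent': 0,
--         'tardy': 0,
--         'total_days': len(attendance_dict)
--     }
--
--     for day, code in attendance_dict.items():
--         code_upper = code.upper().strip()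
--
--         if code_upper in ['X', 'E']:
--             stats['absent'] += 1
--         elif code_upper == 'T':
--             stats['tardy'] += 1
--             stats['present'] += 1  # Tardy counts as present
--         else:
--             stats['present'] += 1
--
--     return stats
-- ===== SOURCE B (Python) =====
-- def parse_daily_attendance(attendance_dict):
--     # Tally normalized codes once, then derive the stats arithmetically:
--     # tardy counts as present, so present = total_days - absent.
--     codes = [code.upper().strip() for code in attendance_dict.values()]
--     counts = {}
--     for c in codes:
--         counts[c] = counts.get(c, 0) + 1
--     total = len(attendance_dict)
--     absent = counts.get('X', 0) + counts.get('E', 0)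
--     tardy = counts.get('T', 0)
--     return {
--         'present': total - absent,
--         'absent': absent,
--         'tardy': tardy,
--         'total_days': total,
--     }
-- ===== Notes on version B (the rewrite author's own statement) =====
-- stated objective: idiomatic
-- what changed: Replaces the per-item branch/increment loop over a stats dict by a tally of normalized codes into a frequency table, from which absent/tardy are read off and present is derived as total - absent.
import Mathlib
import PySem

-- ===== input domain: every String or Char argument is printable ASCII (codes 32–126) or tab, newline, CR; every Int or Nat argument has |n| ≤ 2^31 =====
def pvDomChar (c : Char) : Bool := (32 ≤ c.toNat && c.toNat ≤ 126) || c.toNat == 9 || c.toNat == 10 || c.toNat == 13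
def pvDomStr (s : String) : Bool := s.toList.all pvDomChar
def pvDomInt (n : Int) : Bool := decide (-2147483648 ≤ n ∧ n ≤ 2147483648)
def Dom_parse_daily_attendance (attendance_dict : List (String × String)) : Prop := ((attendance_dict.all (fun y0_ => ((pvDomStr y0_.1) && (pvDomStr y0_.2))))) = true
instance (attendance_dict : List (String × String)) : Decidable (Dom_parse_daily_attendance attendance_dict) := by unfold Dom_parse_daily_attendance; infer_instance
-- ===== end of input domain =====

-- B tallies the normalized codes into a frequency table once and derives the stats
-- arithmetically (present = total_days - absent), instead of A's per-item branch/increment loop.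


-- ===== PORT A =====
-- the loop body of A; stats['k'] += 1 is ported as Dict.modify with default 0 (the key is always present, so this is exact)
def pvStepA (stats : PySem.Dict String Int) (dayCode : String × String) : PySem.Dict String Int :=
  let code_upper := PySem.Str.strip (PySem.Str.upper dayCode.2)
  if code_upper == "X" || code_upper == "E" then
    stats.modify "absent" 0 (· + 1)
  else if code_upper == "T" then
    (stats.modify "tardy" 0 (· + 1)).modify "present" 0 (· + 1)
  else
    stats.modify "present" 0 (· + 1)

def parse_daily_attendance (attendance_dict : List (String × String)) : List (String × Int) :=
  let stats : PySem.Dict String Int :=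
    PySem.Dict.mk [("present", 0), ("absent", 0), ("tardy", 0),
                   ("total_days", (attendance_dict.length : Int))]
  let stats := attendance_dict.foldl pvStepA stats
  stats.items

-- ===== PORT B =====
def parse_daily_attendance_alt (attendance_dict : List (String × String)) : List (String × Int) :=
  let codes := attendance_dict.map (fun p => PySem.Str.strip (PySem.Str.upper p.2))
  let counts : PySem.Dict String Int :=
    codes.foldl (fun cs c => cs.insert c (cs.getD c 0 + 1)) PySem.Dict.empty
  let total : Int := attendance_dict.length
  let absent := counts.getD "X" 0 + counts.getD "E" 0
  let tardy := counts.getD "T" 0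
  [("present", total - absent), ("absent", absent), ("tardy", tardy), ("total_days", total)]

-- ===== PRECONDITION & SPEC =====
def Spec_parse_daily_attendance (attendance_dict : List (String × String)) (out : List (String × Int)) : Prop := out = parse_daily_attendance_alt attendance_dict
instance (attendance_dict : List (String × String)) (out : List (String × Int)) : Decidable (Spec_parse_daily_attendance attendance_dict out) := by unfold Spec_parse_daily_attendance; infer_instance

-- ===== CLAIM (what is proved, stated in full; the proofs are below) =====
def Claim_equal_parse_daily_attendance : Prop := ∀ (attendance_dict : List (String × String)), Dom_parse_daily_attendance attendance_dict → Spec_parse_daily_attendance attendance_dict (parse_daily_attendance attendance_dict)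

-- ===== LEMMAS AND PROOFS =====

-- the normalized code of one (day, code) entry
def pvNorm (x : String × String) : String := PySem.Str.strip (PySem.Str.upper x.2)

lemma pv_step_abs (st : PySem.Dict String Int) (x : String × String)
    (h : (pvNorm x == "X" || pvNorm x == "E") = true) :
    pvStepA st x = st.modify "absent" 0 (· + 1) := by
  simp only [pvStepA, pvNorm] at h ⊢; simp [h]

lemma pv_step_tardy (st : PySem.Dict String Int) (x : String × String)
    (h1 : (pvNorm x == "X" || pvNorm x == "E") = false) (h2 : (pvNorm x == "T") = true) :
    pvStepA st x = (st.modify "tardy" 0 (· + 1)).modify "present" 0 (· + 1) := by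
  simp only [pvStepA, pvNorm] at h1 h2 ⊢; simp [h1, h2]

lemma pv_step_present (st : PySem.Dict String Int) (x : String × String)
    (h1 : (pvNorm x == "X" || pvNorm x == "E") = false) (h2 : (pvNorm x == "T") = false) :
    pvStepA st x = st.modify "present" 0 (· + 1) := by
  simp only [pvStepA, pvNorm] at h1 h2 ⊢; simp [h1, h2]

lemma pv_mod_absent (p a t n : Int) :
    (PySem.Dict.mk [("present", p), ("absent", a), ("tardy", t), ("total_days", n)]).modify "absent" 0 (· + 1)
    = PySem.Dict.mk [("present", p), ("absent", a + 1), ("tardy", t), ("total_days", n)] := rfl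

lemma pv_mod_present (p a t n : Int) :
    (PySem.Dict.mk [("present", p), ("absent", a), ("tardy", t), ("total_days", n)]).modify "present" 0 (· + 1)
    = PySem.Dict.mk [("present", p + 1), ("absent", a), ("tardy", t), ("total_days", n)] := rfl

lemma pv_mod_tardy (p a t n : Int) :
    (PySem.Dict.mk [("present", p), ("absent", a), ("tardy", t), ("total_days", n)]).modify "tardy" 0 (· + 1)
    = PySem.Dict.mk [("present", p), ("absent", a), ("tardy", t + 1), ("total_days", n)] := rfl

lemma pv_countP_or {α : Type} (l : List α) (p q : α → Bool)
    (h : ∀ x, ¬(p x = true ∧ q x = true)) :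
    l.countP (fun x => p x || q x) = l.countP p + l.countP q := by
  induction l with
  | nil => simp
  | cons x l ih =>
    simp only [List.countP_cons, ih]
    by_cases hp : p x = true
    · have hq : q x = false := by
        rcases Bool.eq_false_or_eq_true (q x) with h' | h'
        · exact absurd ⟨hp, h'⟩ (h x)
        · exact h'
      simp [hp, hq]
      omega
    · simp [Bool.eq_false_iff.mpr hp]
      by_cases hq : q x = true <;> simp [hq] <;> omega


lemma pv_A_fold (l : List (String × String)) (p a t n : Int) :
    l.foldl pvStepA
      (PySem.Dict.mk [("present", p), ("absent", a), ("tardy", t), ("total_days", n)])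
    = PySem.Dict.mk
        [("present", p + (l.countP fun x => !(pvNorm x == "X" || pvNorm x == "E") : Nat)),
         ("absent", a + (l.countP fun x => pvNorm x == "X" || pvNorm x == "E" : Nat)),
         ("tardy", t + (l.countP fun x => pvNorm x == "T" : Nat)),
         ("total_days", n)] := by
  induction l generalizing p a t n with
  | nil => simp
  | cons x l ih =>
    rw [List.foldl_cons]
    by_cases h1 : (pvNorm x == "X" || pvNorm x == "E") = true
    · have hT : (pvNorm x == "T") = false := by
        rcases Bool.or_eq_true_iff.mp h1 with h' | h' <;> simp [beq_iff_eq] at h' ⊢ <;> simp [h']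
      rw [pv_step_abs _ _ h1, pv_mod_absent, ih]
      simp only [List.countP_cons, h1, hT]
      simp
      ring
    · have h1' := Bool.eq_false_iff.mpr h1
      by_cases h2 : (pvNorm x == "T") = true
      · rw [pv_step_tardy _ _ h1' h2, pv_mod_tardy, pv_mod_present, ih]
        simp only [List.countP_cons, h1', h2]
        simp
        refine ⟨?_, ?_⟩ <;> (push_cast; ring)
      · have h2' := Bool.eq_false_iff.mpr h2
        rw [pv_step_present _ _ h1' h2', pv_mod_present, ih]
        simp only [List.countP_cons, h1', h2']
        simp
        ring


-- ===== VERDICT (by name: the statement is the Claim_ definition above) =====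
theorem parse_daily_attendance_spec : Claim_equal_parse_daily_attendance := by
  intro l _
  unfold Spec_parse_daily_attendance parse_daily_attendance parse_daily_attendance_alt
  simp only [pv_A_fold]
  have hcnt : ∀ (c : String),
      ((l.map pvNorm).foldl (fun cs x => cs.insert x (cs.getD x 0 + 1)) PySem.Dict.empty).getD c 0
        = ((l.map pvNorm).count c : Int) := by
    intro c
    rw [PySem.Dict.getD_foldl_insert_add_one]
    simp
  have hmapnorm : l.map (fun p => PySem.Str.strip (PySem.Str.upper p.2)) = l.map pvNorm := rfl
  simp only [hmapnorm, hcnt]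
  have hcount : ∀ (c : String), (l.map pvNorm).count c = l.countP (fun x => pvNorm x == c) := by
    intro c
    rw [List.count_eq_countP, List.countP_map]
    congr 1
  have hor : (l.countP fun x => pvNorm x == "X" || pvNorm x == "E")
      = l.countP (fun x => pvNorm x == "X") + l.countP (fun x => pvNorm x == "E") := by
    apply pv_countP_or
    intro x ⟨hx, he⟩
    simp [beq_iff_eq] at hx he
    rw [hx] at he
    exact absurd he (by decide)
  have hle : l.countP (fun x => pvNorm x == "X") + l.countP (fun x => pvNorm x == "E") ≤ l.length := by
    rw [← hor]; exact List.countP_le_length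
  have hlen : l.countP (fun x => !(pvNorm x == "X" || pvNorm x == "E"))
      = l.length - (l.countP (fun x => pvNorm x == "X") + l.countP (fun x => pvNorm x == "E")) := by
    have h2 := l.length_eq_countP_add_countP (fun x => pvNorm x == "X" || pvNorm x == "E")
    simp only [decide_not, Bool.decide_eq_true] at h2
    omega
  simp only [hcount, hor, hlen]
  rw [Nat.cast_sub hle]
  simp only [List.cons.injEq, Prod.mk.injEq]
  exact ⟨⟨trivial, by push_cast; ring⟩, ⟨trivial, by push_cast; ring⟩, ⟨trivial, by ring⟩, trivial⟩
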